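-- pv_equiv track=rewrite | github.com/mroncarelli/pyxhydro | xraysim/specutils/specfit.py | __notice_list_split
-- ===== SOURCE A (Python) =====
-- def __notice_list_split(notice) -> list:
--     """
--     Splits a list with notice channels into intervals to be used with the notice command.
--     :param notice: (list of int) Notice channels, in increasing order
--     :return: (list of tuples) List containg tuples with the starting and endpoint of the intervals
--     """
--     result = []
--     if notice is not None:
--         index = 0
--         start = notice[index]
--         if len(notice) == 1:
--             result.append((notice[0], notice[0]))
--         else:
--             while index < len(notice) - 1:
--                 index += 1
--                 while notice[index] == notice[index - 1] + 1 and index < len(notice) - 1: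
--                     index += 1
--                 if index != len(notice) - 1:
--                     result.append((start, notice[index - 1]))
--                     start = notice[index]
--                 else:
--                     if notice[index] == notice[index - 1] + 1:
--                         result.append((start, notice[index]))
--                     else:
--                         result.append((start, notice[index - 1]))
--                         result.append((notice[index], notice[index]))
--
--     return result
-- ===== SOURCE B (Python) =====
-- def __notice_list_split(notice) -> list:
--     if notice is None:
--         return []
--     n = len(notice)
--     _ = notice[0]  # empty list raises IndexError, as in the original
--     breaks = [i for i in range(1, n) if notice[i] != notice[i - 1] + 1]
--     starts = [0] + breaks
--     ends = [b - 1 for b in breaks] + [n - 1]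
--     return [(notice[s], notice[e]) for s, e in zip(starts, ends)]
-- ===== Notes on version B (the rewrite author's own statement) =====
-- stated objective: alternative
-- what changed: Replaces A's interleaved nested-while index-advancing pass (with a carried 'start' and special last-element branching) by a two-phase boundary-table decomposition: first collect the break indices where notice[i] != notice[i-1]+1, then zip segment start-indices [0]+breaks with end-indices [b-1 for b in breaks]+[n-1] and read the values off.
import Mathlib
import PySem

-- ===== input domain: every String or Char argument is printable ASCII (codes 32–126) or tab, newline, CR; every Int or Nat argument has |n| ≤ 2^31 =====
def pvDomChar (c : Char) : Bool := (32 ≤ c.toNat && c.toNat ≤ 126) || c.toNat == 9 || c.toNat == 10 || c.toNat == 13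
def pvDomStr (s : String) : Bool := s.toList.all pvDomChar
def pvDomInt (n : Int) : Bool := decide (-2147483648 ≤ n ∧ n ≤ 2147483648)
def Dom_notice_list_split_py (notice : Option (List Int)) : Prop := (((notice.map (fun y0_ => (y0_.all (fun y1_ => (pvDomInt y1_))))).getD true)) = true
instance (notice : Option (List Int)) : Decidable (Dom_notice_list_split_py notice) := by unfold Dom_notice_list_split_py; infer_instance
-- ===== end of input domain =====

-- B replaces A's interleaved nested-while scan by a two-phase boundary-table decomposition
-- (collect break indices, then zip start/end indices); same O(n) cost, different structure ("alternative").


-- ===== PORT A =====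
-- inner `while notice[index] == notice[index-1] + 1 and index < len(notice) - 1: index += 1`
-- (all index accesses are in range whenever reached, so `getD … 0` is exact here)
def nlsInner (xs : List Int) (index : Nat) : Nat :=
  if _h : xs.getD index 0 = xs.getD (index - 1) 0 + 1 ∧ index < xs.length - 1 then
    nlsInner xs (index + 1)
  else index
termination_by xs.length - index
decreasing_by omega

-- termination fact the outer loop's recursion cites
theorem nlsInner_ge (xs : List Int) (index : Nat) : index ≤ nlsInner xs index := by
  fun_induction nlsInner xs index with
  | case1 i h ih => omega
  | case2 i h => omega

-- outer `while index < len(notice) - 1:` with its trailing if/else chain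
def nlsOuter (xs : List Int) (index : Nat) (start : Int) (result : List (Int × Int)) :
    List (Int × Int) :=
  if _h : index < xs.length - 1 then
    let index' := nlsInner xs (index + 1)
    if index' ≠ xs.length - 1 then
      nlsOuter xs index' (xs.getD index' 0) (result ++ [(start, xs.getD (index' - 1) 0)])
    else
      if xs.getD index' 0 = xs.getD (index' - 1) 0 + 1 then
        result ++ [(start, xs.getD index' 0)]
      else
        result ++ [(start, xs.getD (index' - 1) 0), (xs.getD index' 0, xs.getD index' 0)]
  else result
termination_by xs.length - index
decreasing_by have := nlsInner_ge xs (index + 1); omega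

-- `start = notice[0]` raises IndexError on the empty list; Pre_ excludes it
def notice_list_split_py (notice : Option (List Int)) : List (Int × Int) :=
  match notice with
  | none => []
  | some xs =>
    if xs.length = 1 then [(xs.getD 0 0, xs.getD 0 0)]
    else nlsOuter xs 0 (xs.getD 0 0) []

-- ===== PORT B =====
-- two-phase: break indices, then zip of start-/end-index tables (empty list excluded by Pre_)
def notice_list_split_py_alt (notice : Option (List Int)) : List (Int × Int) :=
  match notice with
  | none => []
  | some xs =>
    let n := xs.length
    let breaks := (List.range' 1 (n - 1)).filter (fun i => xs.getD i 0 != xs.getD (i - 1) 0 + 1)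
    let starts := 0 :: breaks
    let ends := breaks.map (fun b => b - 1) ++ [n - 1]
    (starts.zip ends).map (fun p => (xs.getD p.1 0, xs.getD p.2 0))

-- ===== PRECONDITION & SPEC =====
-- Pre_ excludes exactly `some []`, on which A raises IndexError at `notice[0]`.
def Pre_notice_list_split_py (notice : Option (List Int)) : Prop :=
  notice ≠ some ([] : List Int)
instance (notice : Option (List Int)) : Decidable (Pre_notice_list_split_py notice) := by
  unfold Pre_notice_list_split_py; infer_instance
def pvWitness_notice_list_split_py : Option (List Int) := some [1, 2, 3, 7, 9, 10]
def Spec_notice_list_split_py (notice : Option (List Int)) (out : List (Int × Int)) : Prop :=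
  out = notice_list_split_py_alt notice
instance (notice : Option (List Int)) (out : List (Int × Int)) :
    Decidable (Spec_notice_list_split_py notice out) := by
  unfold Spec_notice_list_split_py; infer_instance

-- ===== CLAIM (what is proved, stated in full; the proofs are below) =====
def Claim_equal_notice_list_split_py : Prop :=
  ∀ (notice : Option (List Int)), Dom_notice_list_split_py notice →
    Pre_notice_list_split_py notice →
    Spec_notice_list_split_py notice (notice_list_split_py notice)

-- ===== LEMMAS AND PROOFS =====

-- canonical one-element-at-a-time run splitter: both ports are proved equal to it
def pvRuns (a prev : Int) (rest : List Int) : List (Int × Int) :=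
  match rest with
  | [] => [(a, prev)]
  | x :: t => if x = prev + 1 then pvRuns a x t else (a, prev) :: pvRuns x x t

theorem inner_spec (xs : List Int) (i : Nat) :
    1 ≤ i → i ≤ xs.length - 1 →
    nlsInner xs i ≤ xs.length - 1 ∧
    (∀ s : Int, pvRuns s (xs.getD (i - 1) 0) (xs.drop i) =
      pvRuns s (xs.getD (nlsInner xs i - 1) 0) (xs.drop (nlsInner xs i))) ∧
    (nlsInner xs i < xs.length - 1 →
      ¬ xs.getD (nlsInner xs i) 0 = xs.getD (nlsInner xs i - 1) 0 + 1) := by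
  fun_induction nlsInner xs i with
  | case1 i h ih =>
    intro h1 h2
    obtain ⟨hc, hlt⟩ := h
    have ih' := ih (by omega) (by omega)
    refine ⟨ih'.1, ?_, ih'.2.2⟩
    intro s
    have hi : i < xs.length := by omega
    have hdrop : xs.drop i = xs.getD i 0 :: xs.drop (i + 1) := by
      rw [List.getD_eq_getElem xs 0 hi]
      exact List.drop_eq_getElem_cons hi
    rw [hdrop, pvRuns, if_pos hc]
    have := ih'.2.1 s
    simpa using this
  | case2 i h =>
    intro h1 h2
    refine ⟨h2, fun s => rfl, fun hlt => ?_⟩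
    intro hc
    exact h ⟨hc, hlt⟩

theorem outer_eq (xs : List Int) (j : Nat) (s : Int) (res : List (Int × Int))
    (hj : j < xs.length - 1) :
    nlsOuter xs j s res = res ++ pvRuns s (xs.getD j 0) (xs.drop (j + 1)) := by
  suffices H : ∀ d j s res, xs.length - 1 - j ≤ d → j < xs.length - 1 →
      nlsOuter xs j s res = res ++ pvRuns s (xs.getD j 0) (xs.drop (j + 1)) by
    exact H _ j s res le_rfl hj
  intro d
  induction d with
  | zero => intro j s res hle hj; omega
  | succ d ih =>
    intro j s res hle hj
    rw [nlsOuter]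
    rw [dif_pos hj]
    set k := nlsInner xs (j + 1) with hk
    have hge : j + 1 ≤ k := nlsInner_ge xs (j + 1)
    obtain ⟨hkle, hstep, hstop⟩ := inner_spec xs (j + 1) (by omega) (by omega)
    simp only [← hk] at hkle hstep hstop
    simp only [Nat.add_sub_cancel] at hstep
    by_cases hkk : k = xs.length - 1
    · rw [if_neg (by simp [hkk])]
      have hklen : k < xs.length := by omega
      have hdrop : xs.drop k = xs.getD k 0 :: xs.drop (k + 1) := by
        rw [List.getD_eq_getElem xs 0 hklen]
        exact List.drop_eq_getElem_cons hklen
      have hnil : xs.drop (k + 1) = [] := by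
        apply List.drop_eq_nil_of_le; omega
      rw [hstep s, hdrop, hnil]
      by_cases hc : xs.getD k 0 = xs.getD (k - 1) 0 + 1
      · rw [if_pos hc, pvRuns, if_pos hc, pvRuns]
      · rw [if_neg hc, pvRuns, if_neg hc, pvRuns]
    · rw [if_pos hkk]
      have hklt : k < xs.length - 1 := by omega
      have hklen : k < xs.length := by omega
      have hdrop : xs.drop k = xs.getD k 0 :: xs.drop (k + 1) := by
        rw [List.getD_eq_getElem xs 0 hklen]
        exact List.drop_eq_getElem_cons hklen
      rw [ih k (xs.getD k 0) _ (by omega) hklt]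
      rw [hstep s, hdrop, pvRuns, if_neg (hstop hklt)]
      simp

theorem A_runs (h : Int) (t : List Int) :
    notice_list_split_py (some (h :: t)) = pvRuns h h t := by
  cases t with
  | nil => simp [notice_list_split_py, pvRuns]
  | cons x t' =>
    rw [notice_list_split_py]
    rw [if_neg (by simp)]
    rw [outer_eq _ 0 _ _ (by simp)]
    simp [pvRuns]

-- ---- B side ----

def pvBreaksB (xs : List Int) : List Nat :=
  (List.range' 1 (xs.length - 1)).filter (fun i => xs.getD i 0 != xs.getD (i - 1) 0 + 1)

theorem alt_some (xs : List Int) :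
    notice_list_split_py_alt (some xs) =
      ((0 :: pvBreaksB xs).zip ((pvBreaksB xs).map (fun b => b - 1) ++ [xs.length - 1])).map
        (fun p => (xs.getD p.1 0, xs.getD p.2 0)) := rfl

theorem breaks_ge_one (xs : List Int) : ∀ c ∈ pvBreaksB xs, 1 ≤ c := by
  intro c hc
  have := List.mem_range'.1 (List.mem_of_mem_filter hc)
  omega

-- the zipped (start,end) index pairs follow a simple chain recursion
def pvChain (m : Nat) : List Nat → List (Nat × Nat)
  | [] => []
  | [k] => [(k, m)]
  | k :: c :: r => (k, c - 1) :: pvChain m (c :: r)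

theorem zip_chain (br : List Nat) (k m : Nat) :
    (k :: br).zip (br.map (fun c => c - 1) ++ [m]) = pvChain m (k :: br) := by
  induction br generalizing k with
  | nil => rfl
  | cons c r ih => simp [pvChain, ← ih c]

theorem chain_shift (m : Nat) (l : List Nat) (hne : l ≠ [])
    (htl : ∀ c ∈ l.tail, 1 ≤ c) :
    pvChain (m + 1) (l.map (· + 1)) = (pvChain m l).map (fun p => (p.1 + 1, p.2 + 1)) := by
  match l with
  | [k] => rfl
  | k :: c :: r =>
    have hc : 1 ≤ c := htl c (by simp)
    have ih := chain_shift m (c :: r) (by simp) (fun x hx => htl x (List.mem_cons_of_mem c hx))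
    simp only [List.map_cons, pvChain]
    rw [show (c + 1) :: r.map (· + 1) = (c :: r).map (· + 1) from by simp, ih]
    congr 1
    simp
    omega

theorem breaks_cons (a b : Int) (t : List Int) :
    pvBreaksB (a :: b :: t) =
      (if b = a + 1 then [] else [1]) ++ (pvBreaksB (b :: t)).map (· + 1) := by
  unfold pvBreaksB
  have hlen : (a :: b :: t).length - 1 = t.length + 1 := by simp
  have hlen2 : (b :: t).length - 1 = t.length := by simp
  rw [hlen, hlen2, List.range'_succ, List.filter_cons]
  have hr2 : List.range' 2 t.length = (List.range' 1 t.length).map (· + 1) := by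
    rw [List.range'_eq_map_range, List.range'_eq_map_range, List.map_map]
    apply List.map_congr_left
    intro i _
    simp
    omega
  rw [hr2, List.filter_map]
  have hfc : (List.range' 1 t.length).filter
        ((fun i => (a :: b :: t).getD i 0 != (a :: b :: t).getD (i - 1) 0 + 1) ∘ (· + 1)) =
      (List.range' 1 t.length).filter
        (fun i => (b :: t).getD i 0 != (b :: t).getD (i - 1) 0 + 1) := by
    apply List.filter_congr
    intro i hi
    have h1 : 1 ≤ i := (List.mem_range'_1.1 hi).1
    obtain ⟨i', rfl⟩ : ∃ i', i = i' + 1 := ⟨i - 1, by omega⟩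
    simp [Function.comp]
  rw [hfc]
  by_cases hc : b = a + 1
  · simp [hc]
  · simp [hc, bne_iff_ne]

def pvSetStart (a : Int) : List (Int × Int) → List (Int × Int)
  | [] => []
  | (_, e) :: r => (a, e) :: r

def pvSegMap (xs : List Int) (l : List (Nat × Nat)) : List (Int × Int) :=
  l.map (fun p => (xs.getD p.1 0, xs.getD p.2 0))

theorem segmap_shift (y : Int) (xs : List Int) (l : List (Nat × Nat)) :
    pvSegMap (y :: xs) (l.map (fun p => (p.1 + 1, p.2 + 1))) = pvSegMap xs l := by
  simp [pvSegMap, List.map_map, Function.comp]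

theorem setStart_head (zs : List Int) (m : Nat) (l : List Nat) :
    pvSetStart (zs.getD 0 0) (pvSegMap zs (pvChain m (0 :: l))) =
      pvSegMap zs (pvChain m (0 :: l)) := by
  cases l <;> simp [pvChain, pvSegMap, pvSetStart]

theorem chain_step_shift (a y : Int) (zs : List Int) (m : Nat) (l : List Nat)
    (hl : ∀ c ∈ l, 1 ≤ c) :
    pvSetStart a (pvSegMap (y :: zs) (pvChain (m + 1) (0 :: l.map (· + 1)))) =
      pvSetStart a (pvSegMap zs (pvChain m (0 :: l))) := by
  cases l with
  | nil => simp [pvChain, pvSegMap, pvSetStart]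
  | cons c r =>
    have hc1 : 1 ≤ c := hl c (by simp)
    have hsh := chain_shift m (c :: r) (by simp)
      (fun x hx => hl x (List.mem_cons_of_mem c hx))
    simp only [List.map_cons] at hsh ⊢
    rw [show pvChain (m + 1) (0 :: (c + 1) :: r.map (· + 1)) =
        (0, c) :: pvChain (m + 1) ((c + 1) :: r.map (· + 1)) from by simp [pvChain],
      show pvChain m (0 :: c :: r) = (0, c - 1) :: pvChain m (c :: r) from rfl,
      hsh]
    obtain ⟨c', rfl⟩ : ∃ c', c = c' + 1 := ⟨c - 1, by omega⟩
    simp [pvSegMap, pvSetStart, List.map_map, Function.comp]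

theorem G (t : List Int) (b a : Int) :
    pvSetStart a (pvSegMap (b :: t)
      (pvChain ((b :: t).length - 1) (0 :: pvBreaksB (b :: t)))) = pvRuns a b t := by
  induction t generalizing b a with
  | nil => simp [pvBreaksB, pvChain, pvSegMap, pvSetStart, pvRuns]
  | cons x t' ih =>
    rw [breaks_cons]
    have hbr := breaks_ge_one (x :: t')
    have hlen : (b :: x :: t').length - 1 = t'.length + 1 := by simp
    have hlen2 : (x :: t').length - 1 = t'.length := by simp
    rw [hlen]
    by_cases hc : x = b + 1
    · rw [if_pos hc]
      simp only [List.nil_append]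
      rw [chain_step_shift a b (x :: t') t'.length (pvBreaksB (x :: t')) hbr]
      rw [pvRuns, if_pos hc]
      have := ih x a
      rw [hlen2] at this
      exact this
    · rw [if_neg hc]
      simp only [List.cons_append, List.nil_append]
      have hsh := chain_shift t'.length (0 :: pvBreaksB (x :: t')) (by simp)
        (fun c hcm => hbr c hcm)
      simp only [List.map_cons] at hsh
      rw [show pvChain (t'.length + 1) (0 :: 1 :: (pvBreaksB (x :: t')).map (· + 1)) =
          (0, 0) :: pvChain (t'.length + 1) (1 :: (pvBreaksB (x :: t')).map (· + 1)) from rfl,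
        show (1 : Nat) = 0 + 1 from rfl, hsh]
      rw [pvRuns, if_neg hc]
      have htail : pvSegMap (x :: t')
          (pvChain t'.length (0 :: pvBreaksB (x :: t'))) = pvRuns x x t' := by
        have hh := setStart_head (x :: t') t'.length (pvBreaksB (x :: t'))
        simp only [List.getD_cons_zero] at hh
        have hg := ih x x
        rw [hlen2] at hg
        rw [← hh, hg]
      rw [show pvSegMap (b :: x :: t') ((0, 0) ::
          (pvChain t'.length (0 :: pvBreaksB (x :: t'))).map (fun p => (p.1 + 1, p.2 + 1))) =
          (b, b) :: pvSegMap (b :: x :: t')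
            ((pvChain t'.length (0 :: pvBreaksB (x :: t'))).map (fun p => (p.1 + 1, p.2 + 1)))
          from rfl]
      rw [segmap_shift b (x :: t') (pvChain t'.length (0 :: pvBreaksB (x :: t'))), htail]
      rfl

theorem B_runs (h : Int) (t : List Int) :
    notice_list_split_py_alt (some (h :: t)) = pvRuns h h t := by
  rw [alt_some, zip_chain]
  show pvSegMap (h :: t) (pvChain ((h :: t).length - 1) (0 :: pvBreaksB (h :: t))) = pvRuns h h t
  have hh := setStart_head (h :: t) ((h :: t).length - 1) (pvBreaksB (h :: t))
  simp only [List.getD_cons_zero] at hh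
  rw [← hh]
  exact G t h h

-- ===== VERDICT (by name: the statement is the Claim_ definition above) =====
theorem notice_list_split_py_spec : Claim_equal_notice_list_split_py := by
  intro notice hdom hpre
  unfold Spec_notice_list_split_py
  match notice with
  | none => rfl
  | some [] => exact absurd rfl hpre
  | some (h :: t) => rw [A_runs, B_runs]
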